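-- pv_equiv track=rewrite | github.com/kristbaum/arthistorical-semantic-data-extraction | src/articles/fix_zitat.py | _apply_repairs_to_text
-- ===== SOURCE A (Python) =====
-- def _apply_repairs_to_text(
--     text: str, repairs: list[tuple[int, int, str, str]]
-- ) -> str:
--     """Splice (start, end, damaged, correct) repairs into text."""
--     if not repairs:
--         return text
--     parts: list[str] = []
--     prev = 0
--     for start, end, _damaged, correct in repairs:
--         parts.append(text[prev:start])
--         parts.append(correct)
--         prev = end
--     parts.append(text[prev:])
--     return "".join(parts)
-- ===== SOURCE B (Python) =====
-- def _apply_repairs_to_text(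
--     text: str, repairs: list[tuple[int, int, str, str]]
-- ) -> str:
--     """Splice repairs into text, assembled back-to-front with a rolling string."""
--     res = ""
--     nxt = None
--     for start, end, _damaged, correct in reversed(repairs):
--         gap = text[end:] if nxt is None else text[end:nxt]
--         res = correct + gap + res
--         nxt = start
--     head = text if nxt is None else text[:nxt]
--     return head + res
-- ===== Notes on version B (the rewrite author's own statement) =====
-- stated objective: alternative
-- what changed: B builds the result back-to-front by iterating the repairs in reverse and splicing each correction onto a single rolling string, instead of A's forward pass that accumulates a parts list and joins it.
import Mathlib
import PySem

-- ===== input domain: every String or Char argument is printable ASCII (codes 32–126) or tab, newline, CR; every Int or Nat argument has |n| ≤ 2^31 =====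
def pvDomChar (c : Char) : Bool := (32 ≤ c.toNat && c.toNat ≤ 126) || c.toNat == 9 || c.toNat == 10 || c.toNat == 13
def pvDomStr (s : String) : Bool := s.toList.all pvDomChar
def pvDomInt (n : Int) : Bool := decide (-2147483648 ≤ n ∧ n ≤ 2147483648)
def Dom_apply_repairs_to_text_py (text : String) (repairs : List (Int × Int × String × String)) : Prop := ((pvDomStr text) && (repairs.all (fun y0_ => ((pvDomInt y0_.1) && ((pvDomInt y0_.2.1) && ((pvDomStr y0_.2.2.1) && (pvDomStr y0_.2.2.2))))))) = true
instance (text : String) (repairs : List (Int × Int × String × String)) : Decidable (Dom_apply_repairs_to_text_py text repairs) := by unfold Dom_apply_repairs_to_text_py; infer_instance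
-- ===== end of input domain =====

-- B assembles the result back-to-front onto one rolling string (reversed iteration, no
-- parts list / join); same value on every input. Objective: alternative decomposition.

-- ===== PORT A =====
-- forward pass: parts list + prev cursor, then "".join(parts)
def apply_repairs_to_text_py (text : String) (repairs : List (Int × Int × String × String)) : String :=
  if repairs = [] then text
  else
    let st := repairs.foldl
      (fun (acc : List String × Int) r =>
        (acc.1 ++ [PySem.Str.slice text (some acc.2) (some r.1), r.2.2.2], r.2.1))
      ([], 0)
    PySem.Str.join "" (st.1 ++ [PySem.Str.slice text (some st.2) none])

-- ===== PORT B =====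
-- str concatenation 'correct + gap + res' is ported on List Char (exact for Python's str +)
def apply_repairs_to_text_py_alt (text : String) (repairs : List (Int × Int × String × String)) : String :=
  let st := repairs.reverse.foldl
    (fun (st : List Char × Option Int) r =>
      let gap := match st.2 with
        | none => PySem.Chars.slice text.toList (some r.2.1) none
        | some nxt => PySem.Chars.slice text.toList (some r.2.1) (some nxt)
      (r.2.2.2.toList ++ gap ++ st.1, some r.1))
    ([], none)
  let head := match st.2 with
    | none => text.toList
    | some nxt => PySem.Chars.slice text.toList none (some nxt)
  String.ofList (head ++ st.1)

-- ===== PRECONDITION & SPEC =====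
def Spec_apply_repairs_to_text_py (text : String) (repairs : List (Int × Int × String × String)) (out : String) : Prop := out = apply_repairs_to_text_py_alt text repairs
instance (text : String) (repairs : List (Int × Int × String × String)) (out : String) : Decidable (Spec_apply_repairs_to_text_py text repairs out) := by unfold Spec_apply_repairs_to_text_py; infer_instance

-- ===== CLAIM (what is proved, stated in full; the proofs are below) =====
def Claim_equal_apply_repairs_to_text_py : Prop := ∀ (text : String) (repairs : List (Int × Int × String × String)), Dom_apply_repairs_to_text_py text repairs → Spec_apply_repairs_to_text_py text repairs (apply_repairs_to_text_py text repairs)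

-- ===== LEMMAS AND PROOFS =====

-- common reference shape: the spliced result as one recursive function over the repairs
def pvSpec (cs : List Char) (prev : Int) : List (Int × Int × String × String) → List Char
  | [] => PySem.Chars.slice cs (some prev) none
  | r :: rest =>
      PySem.Chars.slice cs (some prev) (some r.1) ++ r.2.2.2.toList ++ pvSpec cs r.2.1 rest

theorem pv_join_nil_flatten (ls : List (List Char)) :
    PySem.Chars.join [] ls = ls.flatten := by
  induction ls with
  | nil => simp [PySem.Chars.join_nil]
  | cons p t ih =>
    cases t with
    | nil => simp [PySem.Chars.join_singleton]
    | cons q rest => simp [PySem.Chars.join_cons_cons, ih]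

theorem pv_A_fold (text : String) (rs : List (Int × Int × String × String)) :
    ∀ (parts : List String) (prev : Int),
    (((rs.foldl
        (fun (acc : List String × Int) r =>
          (acc.1 ++ [PySem.Str.slice text (some acc.2) (some r.1), r.2.2.2], r.2.1))
        (parts, prev)).1
      ++ [PySem.Str.slice text (some (rs.foldl
        (fun (acc : List String × Int) r =>
          (acc.1 ++ [PySem.Str.slice text (some acc.2) (some r.1), r.2.2.2], r.2.1))
        (parts, prev)).2) none]).map String.toList).flatten
    = (parts.map String.toList).flatten ++ pvSpec text.toList prev rs := by
  induction rs with
  | nil =>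
    intro parts prev
    simp [pvSpec, PySem.Str.slice]
  | cons r rest ih =>
    intro parts prev
    simp only [List.foldl_cons]
    rw [ih]
    simp [pvSpec, PySem.Str.slice]

theorem pv_A_eq_spec (text : String) (repairs : List (Int × Int × String × String)) :
    (apply_repairs_to_text_py text repairs).toList = pvSpec text.toList 0 repairs := by
  unfold apply_repairs_to_text_py
  by_cases h : repairs = []
  · subst h
    simp [pvSpec, PySem.Chars.slice]
  · simp only [if_neg h]
    rw [PySem.Str.toList_join]
    have h0 : ("" : String).toList = [] := rfl
    rw [h0, pv_join_nil_flatten, pv_A_fold]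
    simp

theorem pv_B_fold (text : String) (rs : List (Int × Int × String × String)) :
    ((rs.reverse.foldl
        (fun (st : List Char × Option Int) r =>
          (r.2.2.2.toList ++ (match st.2 with
            | none => PySem.Chars.slice text.toList (some r.2.1) none
            | some nxt => PySem.Chars.slice text.toList (some r.2.1) (some nxt)) ++ st.1,
           some r.1))
        ([], none)).2 = (rs.head?).map (·.1))
    ∧ ∀ (e : Int),
      (match (rs.reverse.foldl
        (fun (st : List Char × Option Int) r =>
          (r.2.2.2.toList ++ (match st.2 with
            | none => PySem.Chars.slice text.toList (some r.2.1) none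
            | some nxt => PySem.Chars.slice text.toList (some r.2.1) (some nxt)) ++ st.1,
           some r.1))
        ([], none)).2 with
        | none => PySem.Chars.slice text.toList (some e) none
        | some nxt => PySem.Chars.slice text.toList (some e) (some nxt))
      ++ (rs.reverse.foldl
        (fun (st : List Char × Option Int) r =>
          (r.2.2.2.toList ++ (match st.2 with
            | none => PySem.Chars.slice text.toList (some r.2.1) none
            | some nxt => PySem.Chars.slice text.toList (some r.2.1) (some nxt)) ++ st.1,
           some r.1))
        ([], none)).1
      = pvSpec text.toList e rs := by
  induction rs with
  | nil => exact ⟨rfl, fun e => by simp [pvSpec]⟩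
  | cons r rest ih =>
    have hrev : (r :: rest).reverse = rest.reverse ++ [r] := by simp
    rw [hrev]
    rw [List.foldl_append]
    obtain ⟨ih2, ihe⟩ := ih
    constructor
    · simp
    · intro e
      simp only [List.foldl_cons, List.foldl_nil]
      have := ihe r.2.1
      simp [pvSpec, ← this]

theorem pv_B_eq_spec (text : String) (repairs : List (Int × Int × String × String)) :
    (apply_repairs_to_text_py_alt text repairs).toList = pvSpec text.toList 0 repairs := by
  unfold apply_repairs_to_text_py_alt
  obtain ⟨h2, he⟩ := pv_B_fold text repairs
  have := he 0
  cases repairs with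
  | nil =>
    simp at this ⊢
    simp [pvSpec, PySem.Chars.slice] at this ⊢
  | cons r rest =>
    simp only [h2] at this ⊢
    simp only [List.head?_cons, Option.map_some] at this ⊢
    rw [← this]
    simp [PySem.List.slice_zero_start]

-- ===== VERDICT (by name: the statement is the Claim_ definition above) =====
theorem apply_repairs_to_text_py_spec : Claim_equal_apply_repairs_to_text_py := by
  intro text repairs _
  unfold Spec_apply_repairs_to_text_py
  have h := (pv_A_eq_spec text repairs).trans (pv_B_eq_spec text repairs).symm
  have := congrArg String.ofList h
  simpa using this
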